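-- pv_equiv track=rewrite | github.com/Sumedha494/DSA-Questions | minimum_paranthesis.py | count_valid_substrings
-- ===== SOURCE A (Python) =====
-- def count_valid_substrings(s):
--     """
--     Count all valid parentheses substrings
--     """
--     count = 0
--     n = len(s)
--
--     for i in range(n):
--         balance = 0
--         for j in range(i, n):
--             if s[j] == '(':
--                 balance += 1
--             else:
--                 balance -= 1
--
--             if balance < 0:
--                 break
--             if balance == 0:
--                 count += 1
--
--     return count
-- ===== SOURCE B (Python) =====
-- def count_valid_substrings(s):
--     """
--     Count all valid parentheses substrings.
--     O(n) one-pass stack DP: `cur` = number of valid substrings ending at the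
--     current position; on '(' push cur, on a closer pop and extend.
--     Note: like A, every character other than '(' is treated as a closer.
--     """
--     total = 0
--     cur = 0
--     stack = []
--     for ch in s:
--         if ch == '(':
--             stack.append(cur)
--             cur = 0
--         elif stack:
--             cur = stack.pop() + 1
--             total += cur
--         else:
--             cur = 0
--     return total
-- ===== Notes on version B (the rewrite author's own statement) =====
-- stated objective: faster
-- what changed: Replaced the quadratic scan over every start index by a single left-to-right pass with a stack of counters (dp: valid substrings ending at each matched closer), summing as matches are found.
import Mathlib
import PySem

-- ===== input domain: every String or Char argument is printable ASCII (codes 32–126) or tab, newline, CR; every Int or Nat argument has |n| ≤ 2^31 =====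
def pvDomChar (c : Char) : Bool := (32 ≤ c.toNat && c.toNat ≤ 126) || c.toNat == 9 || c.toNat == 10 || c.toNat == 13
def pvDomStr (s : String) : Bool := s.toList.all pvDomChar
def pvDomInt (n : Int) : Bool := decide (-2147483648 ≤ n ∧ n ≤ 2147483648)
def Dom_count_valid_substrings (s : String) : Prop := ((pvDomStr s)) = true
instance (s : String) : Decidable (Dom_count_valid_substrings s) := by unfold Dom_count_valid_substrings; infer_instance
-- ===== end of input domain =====

-- B replaces A's quadratic all-starts scan by a one-pass stack of counters; objective: faster.

-- ===== PORT A =====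
-- inner loop "for j in range(i, n): … if balance < 0: break": recursion over the
-- remaining characters s[i:], returning at the break
def pvInnerA (bal : Int) : List Char → Int
  | [] => 0
  | ch :: rest =>
    let b := bal + (if ch = '(' then 1 else -1)
    if b < 0 then 0
    else (if b = 0 then 1 else 0) + pvInnerA b rest

-- outer loop "for i in range(n)": scans every suffix s[i:] — recursion over the tails
def pvOuterA : List Char → Int
  | [] => 0
  | ch :: rest => pvInnerA 0 (ch :: rest) + pvOuterA rest

def count_valid_substrings (s : String) : Int := pvOuterA s.toList

-- ===== PORT B =====
-- state = (stack, cur, total); '(' pushes cur, any other char pops and extends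
def pvStepB : (List Int × Int × Int) → Char → (List Int × Int × Int)
  | (stack, cur, total), ch =>
    if ch = '(' then (cur :: stack, 0, total)
    else match stack with
      | [] => ([], 0, total)
      | e :: rest => (rest, e + 1, total + (e + 1))

def count_valid_substrings_alt (s : String) : Int :=
  (s.toList.foldl pvStepB ([], 0, 0)).2.2

-- ===== PRECONDITION & SPEC =====
def Spec_count_valid_substrings (s : String) (out : Int) : Prop := out = count_valid_substrings_alt s
instance (s : String) (out : Int) : Decidable (Spec_count_valid_substrings s out) := by unfold Spec_count_valid_substrings; infer_instance

-- ===== CLAIM (what is proved, stated in full; the proofs are below) =====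
def Claim_equal_count_valid_substrings : Prop := ∀ (s : String), Dom_count_valid_substrings s → Spec_count_valid_substrings s (count_valid_substrings s)

-- ===== LEMMAS AND PROOFS =====

-- step value of a character (both programs treat '(' as +1 and every other char as -1)
def pvStp (c : Char) : Int := if c = '(' then 1 else -1

def pvSum : List Char → Int
  | [] => 0
  | c :: r => pvStp c + pvSum r

-- all partial sums starting from bal stay ≥ 0 (A's inner loop does not break)
def pvAlive (bal : Int) : List Char → Bool
  | [] => true
  | c :: r => decide (0 ≤ bal + pvStp c) && pvAlive (bal + pvStp c) r

-- number of valid (balanced, never-negative) nonempty suffixes of the list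
def pvV : List Char → Int
  | [] => 0
  | x :: xs => (if pvAlive 0 (x :: xs) && decide (pvSum (x :: xs) = 0) then 1 else 0) + pvV xs

-- number of nonempty suffixes u of t with u ++ [c] valid
def pvW (c : Char) : List Char → Int
  | [] => 0
  | x :: xs =>
    (if pvAlive 0 (x :: xs) && decide (pvSum (x :: xs) + pvStp c = 0) then 1 else 0) + pvW c xs

def pvBal (r : List Char) : Prop := pvSum r = 0 ∧ pvAlive 0 r = true

def pvAllNonpos : List Char → Bool
  | [] => true
  | x :: xs => decide (pvSum (x :: xs) ≤ 0) && pvAllNonpos xs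

-- B's stack after t: the pvV values of the prefixes before each unmatched '('
-- (most recent on top), the segments after them being balanced
inductive pvStacked : List Char → List Int → Prop
  | nil (t : List Char) : pvAllNonpos t = true → pvStacked t []
  | push (p r : List Char) (st : List Int) :
      pvStacked p st → pvBal r → pvStacked (p ++ '(' :: r) (pvV p :: st)

theorem pvSum_append (l₁ l₂ : List Char) : pvSum (l₁ ++ l₂) = pvSum l₁ + pvSum l₂ := by
  induction l₁ with
  | nil => simp [pvSum]
  | cons x xs ih => simp [pvSum, ih]; ring

theorem pvAlive_append (l₁ l₂ : List Char) (b : Int) :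
    pvAlive b (l₁ ++ l₂) = (pvAlive b l₁ && pvAlive (b + pvSum l₁) l₂) := by
  induction l₁ generalizing b with
  | nil => simp [pvAlive, pvSum]
  | cons x xs ih => simp [pvAlive, pvSum, ih, Bool.and_assoc, add_assoc]

theorem pvAlive_mono {b b' : Int} (h : b ≤ b') (l : List Char) (ha : pvAlive b l = true) :
    pvAlive b' l = true := by
  induction l generalizing b b' with
  | nil => simp [pvAlive]
  | cons x xs ih =>
    simp only [pvAlive, Bool.and_eq_true, decide_eq_true_eq] at ha ⊢
    exact ⟨by omega, ih (by omega) ha.2⟩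

theorem pvAlive_nonneg {b : Int} {x : Char} {xs : List Char}
    (h : pvAlive b (x :: xs) = true) : 0 ≤ b + pvSum (x :: xs) := by
  induction xs generalizing b x with
  | nil => simp [pvAlive, pvSum] at h ⊢; omega
  | cons y ys ih =>
    simp only [pvAlive, Bool.and_eq_true, decide_eq_true_eq] at h
    have h2 : pvAlive (b + pvStp x) (y :: ys) = true := by
      simp [pvAlive, h.2.1, h.2.2]
    have := ih (x := y) (b := b + pvStp x) h2
    simp [pvSum] at this ⊢; omega

-- A's inner loop after appending one character
theorem pvInnerA_append (l : List Char) (b : Int) (c : Char) :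
    pvInnerA b (l ++ [c]) =
      pvInnerA b l + (if pvAlive b l && decide (b + pvSum l + pvStp c = 0) then 1 else 0) := by
  induction l generalizing b with
  | nil =>
    simp only [List.nil_append, pvInnerA, pvAlive, pvSum, Bool.true_and, add_zero]
    rw [show (if c = '(' then (1:Int) else -1) = pvStp c from rfl]
    split_ifs with h1 h2 h3 <;> simp_all
  | cons x xs ih =>
    simp only [List.cons_append, pvInnerA, pvAlive, pvSum]
    rw [show (if x = '(' then (1:Int) else -1) = pvStp x from rfl]
    by_cases hb : b + pvStp x < 0
    · have hd : decide (0 ≤ b + pvStp x) = false := by simp; omega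
      simp [hb, hd]
    · have hd : decide (0 ≤ b + pvStp x) = true := by simp; omega
      have e : b + (pvStp x + pvSum xs) + pvStp c = b + pvStp x + pvSum xs + pvStp c := by ring
      simp only [if_neg hb, hd, Bool.true_and, ih, e]
      ring

theorem pvHead_snoc (u : List Char) (c : Char) :
    (pvAlive 0 (u ++ [c]) && decide (pvSum (u ++ [c]) = 0)) =
      (pvAlive 0 u && decide (pvSum u + pvStp c = 0)) := by
  rw [pvAlive_append, pvSum_append]
  have h1 : pvSum [c] = pvStp c := by simp [pvSum]
  have h2 : pvAlive (0 + pvSum u) [c] = decide (0 ≤ pvSum u + pvStp c) := by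
    simp [pvAlive]
  rw [h1, h2]
  cases hA : pvAlive 0 u
  · simp
  · simp only [Bool.true_and]
    by_cases h : pvSum u + pvStp c = 0
    · simp [h]
    · simp [h]

-- valid suffixes of t ++ [c], counted through t
theorem pvV_snoc (t : List Char) (c : Char) : pvV (t ++ [c]) = pvW c t := by
  induction t with
  | nil =>
    have hne : pvStp c ≠ 0 := by unfold pvStp; split_ifs <;> omega
    simp [pvV, pvW, pvSum, hne]
  | cons x xs ih =>
    rw [List.cons_append]
    simp only [pvV]
    rw [ih, ← List.cons_append, pvHead_snoc]
    simp [pvW]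

theorem pvOuterA_snoc' (t : List Char) (c : Char) :
    pvOuterA (t ++ [c]) = pvOuterA t + pvW c t := by
  induction t with
  | nil =>
    by_cases hc : c = '(' <;> simp [pvOuterA, pvInnerA, pvW, hc]
  | cons x xs ih =>
    rw [List.cons_append]
    simp only [pvOuterA]
    rw [show x :: (xs ++ [c]) = (x :: xs) ++ [c] from rfl, pvInnerA_append, ih]
    simp only [pvW, zero_add]
    ring

-- A gains exactly the valid substrings ending at the appended character
theorem pvOuterA_snoc (t : List Char) (c : Char) :
    pvOuterA (t ++ [c]) = pvOuterA t + pvV (t ++ [c]) := by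
  rw [pvOuterA_snoc', pvV_snoc]

theorem pvNonpos_of_alive (r : List Char) (b : Int) (hb : 0 ≤ b)
    (ha : pvAlive b r = true) (hs : b + pvSum r ≤ 0) : pvAllNonpos r = true := by
  induction r generalizing b with
  | nil => rfl
  | cons x xs ih =>
    simp only [pvAlive, Bool.and_eq_true, decide_eq_true_eq] at ha
    simp only [pvSum] at hs
    simp only [pvAllNonpos, pvSum, Bool.and_eq_true, decide_eq_true_eq]
    exact ⟨by omega, ih (b + pvStp x) (by omega) ha.2 (by omega)⟩

theorem pvAllNonpos_of_bal {r : List Char} (h : pvBal r) : pvAllNonpos r = true :=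
  pvNonpos_of_alive r 0 le_rfl h.2 (by simp [h.1])

theorem pvW_open (t : List Char) : pvW '(' t = 0 := by
  induction t with
  | nil => rfl
  | cons x xs ih =>
    by_cases hA : pvAlive 0 (x :: xs) = true
    · have hnn := pvAlive_nonneg hA
      have : ¬ (pvSum (x :: xs) + pvStp '(' = 0) := by simp [pvStp] at hnn ⊢; omega
      simp [pvW, this, ih]
    · simp [pvW, Bool.eq_false_iff.mpr hA, ih]

theorem pvW_nonpos {t : List Char} {c : Char} (h : pvAllNonpos t = true) (hc : c ≠ '(') :
    pvW c t = 0 := by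
  have hstp : pvStp c = -1 := by simp [pvStp, hc]
  induction t with
  | nil => rfl
  | cons x xs ih =>
    simp only [pvAllNonpos, Bool.and_eq_true, decide_eq_true_eq] at h
    have : ¬ (pvSum (x :: xs) + pvStp c = 0) := by omega
    simp [pvW, this, ih h.2]

theorem pvW_pop {r : List Char} (p : List Char) {c : Char} (hr : pvBal r) (hc : c ≠ '(') :
    pvW c (p ++ '(' :: r) = pvV p + 1 := by
  have hstp : pvStp c = -1 := by simp [pvStp, hc]
  have halo : pvAlive 0 ('(' :: r) = true := by
    simp only [pvAlive, Bool.and_eq_true, decide_eq_true_eq]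
    exact ⟨by simp [pvStp], pvAlive_mono (by simp [pvStp]) r hr.2⟩
  have hso : pvSum ('(' :: r) = 1 := by simp [pvSum, pvStp, hr.1]
  induction p with
  | nil =>
    simp only [List.nil_append, pvW, pvV]
    rw [pvW_nonpos (pvAllNonpos_of_bal hr) hc]
    have hcond : pvSum ('(' :: r) + pvStp c = 0 := by omega
    simp [halo, hcond]
  | cons x p' ih =>
    rw [List.cons_append]
    simp only [pvW]
    rw [ih, ← List.cons_append]
    have hhead : (pvAlive 0 ((x :: p') ++ '(' :: r) &&
        decide (pvSum ((x :: p') ++ '(' :: r) + pvStp c = 0)) =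
        (pvAlive 0 (x :: p') && decide (pvSum (x :: p') = 0)) := by
      rw [pvAlive_append, pvSum_append]
      by_cases hS : pvSum (x :: p') = 0
      · have h2 : pvSum ('(' :: r) + pvStp c = 0 := by omega
        simp [hS, h2, halo]
      · have : ¬ (pvSum (x :: p') + pvSum ('(' :: r) + pvStp c = 0) := by omega
        simp [hS, this]
    rw [hhead]
    simp only [pvV]
    ring

theorem pvAllNonpos_append_bal {p b : List Char} (hp : pvAllNonpos p = true) (hb : pvBal b) :
    pvAllNonpos (p ++ b) = true := by
  induction p with
  | nil => exact pvAllNonpos_of_bal hb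
  | cons x xs ih =>
    simp only [pvAllNonpos, Bool.and_eq_true, decide_eq_true_eq] at hp
    rw [List.cons_append]
    simp only [pvAllNonpos, Bool.and_eq_true, decide_eq_true_eq]
    refine ⟨?_, ih hp.2⟩
    rw [← List.cons_append, pvSum_append, hb.1]
    omega

theorem pvAllNonpos_snoc_neg {t : List Char} {c : Char} (h : pvAllNonpos t = true) (hc : c ≠ '(') :
    pvAllNonpos (t ++ [c]) = true := by
  have hstp : pvStp c = -1 := by simp [pvStp, hc]
  induction t with
  | nil => simp [pvAllNonpos, pvSum, hstp]
  | cons x xs ih =>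
    simp only [pvAllNonpos, Bool.and_eq_true, decide_eq_true_eq] at h
    rw [List.cons_append]
    simp only [pvAllNonpos, Bool.and_eq_true, decide_eq_true_eq]
    refine ⟨?_, ih h.2⟩
    rw [← List.cons_append, pvSum_append]
    have hc1 : pvSum [c] = -1 := by simp [pvSum, hstp]
    omega

theorem pvBal_append {a b : List Char} (ha : pvBal a) (hb : pvBal b) : pvBal (a ++ b) := by
  refine ⟨by rw [pvSum_append, ha.1, hb.1]; ring, ?_⟩
  rw [pvAlive_append]
  simp [ha.1, ha.2, hb.2]

theorem pvBal_wrap {r : List Char} {c : Char} (hr : pvBal r) (hc : c ≠ '(') :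
    pvBal ('(' :: r ++ [c]) := by
  have hstp : pvStp c = -1 := by simp [pvStp, hc]
  have h1 : pvAlive 1 r = true := pvAlive_mono (by omega) r hr.2
  have h2 : pvAlive (1 + pvSum r) [c] = true := by
    simp [pvAlive, hr.1, hstp]
  constructor
  · show pvStp '(' + pvSum (r ++ [c]) = 0
    rw [pvSum_append, hr.1]
    have ho : pvStp '(' = (1 : Int) := rfl
    have hc1 : pvSum [c] = -1 := by simp [pvSum, hstp]
    omega
  · show (decide (0 ≤ 0 + pvStp '(') && pvAlive (0 + pvStp '(') (r ++ [c])) = true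
    rw [pvAlive_append]
    simp [pvStp, h1, h2]

theorem pvStacked_append_bal {p : List Char} {st : List Int} {b : List Char}
    (h : pvStacked p st) (hb : pvBal b) : pvStacked (p ++ b) st := by
  cases h with
  | nil t ht => exact .nil _ (pvAllNonpos_append_bal ht hb)
  | push q r st' hq hr =>
    rw [show (q ++ '(' :: r) ++ b = q ++ '(' :: (r ++ b) by simp]
    exact .push q (r ++ b) st' hq (pvBal_append hr hb)

theorem pvV_open (t : List Char) : pvV (t ++ ['(']) = 0 := by
  rw [pvV_snoc, pvW_open]

-- invariant of B's fold
theorem pvInv (l : List Char) :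
    pvStacked l (l.foldl pvStepB ([], 0, 0)).1 ∧
    (l.foldl pvStepB ([], 0, 0)).2.1 = pvV l ∧
    (l.foldl pvStepB ([], 0, 0)).2.2 = pvOuterA l := by
  induction l using List.reverseRecOn with
  | nil => exact ⟨.nil [] rfl, rfl, rfl⟩
  | append_singleton l c ih =>
    obtain ⟨hst, hcur, htot⟩ := ih
    rcases hE : l.foldl pvStepB ([], 0, 0) with ⟨st, cur, tot⟩
    rw [hE] at hst hcur htot
    simp only at hst hcur htot
    rw [List.foldl_append, hE]
    simp only [List.foldl_cons, List.foldl_nil]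
    by_cases hc : c = '('
    · subst hc
      have hstep : pvStepB (st, cur, tot) '(' = (cur :: st, 0, tot) := by
        simp [pvStepB]
      rw [hstep]
      refine ⟨?_, ?_, ?_⟩
      · subst hcur
        exact pvStacked.push l [] st hst ⟨rfl, rfl⟩
      · exact (pvV_open l).symm
      · show tot = pvOuterA (l ++ ['('])
        rw [pvOuterA_snoc, pvV_open, htot]
        omega
    · cases st with
      | nil =>
        have hnp : pvAllNonpos l = true := by
          cases hst with
          | nil _ h => exact h
        have hstep : pvStepB ([], cur, tot) c = ([], 0, tot) := by
          simp [pvStepB, hc]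
        rw [hstep]
        refine ⟨?_, ?_, ?_⟩
        · exact .nil _ (pvAllNonpos_snoc_neg hnp hc)
        · show (0 : Int) = pvV (l ++ [c])
          rw [pvV_snoc, pvW_nonpos hnp hc]
        · show tot = pvOuterA (l ++ [c])
          rw [pvOuterA_snoc, pvV_snoc, pvW_nonpos hnp hc, htot]
          omega
      | cons e st' =>
        cases hst with
        | push p r st2 hp hr =>
          have hstep : pvStepB (pvV p :: st', cur, tot) c =
              (st', pvV p + 1, tot + (pvV p + 1)) := by
            simp [pvStepB, hc]
          rw [hstep]
          refine ⟨?_, ?_, ?_⟩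
          · rw [show (p ++ '(' :: r) ++ [c] = p ++ '(' :: (r ++ [c]) by simp]
            exact pvStacked_append_bal hp (pvBal_wrap hr hc)
          · show pvV p + 1 = pvV ((p ++ '(' :: r) ++ [c])
            rw [pvV_snoc, pvW_pop p hr hc]
          · show tot + (pvV p + 1) = pvOuterA ((p ++ '(' :: r) ++ [c])
            rw [pvOuterA_snoc, pvV_snoc, pvW_pop p hr hc, htot]

-- ===== VERDICT (by name: the statement is the Claim_ definition above) =====
theorem count_valid_substrings_spec : Claim_equal_count_valid_substrings := by
  intro s _
  unfold Spec_count_valid_substrings count_valid_substrings count_valid_substrings_alt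
  exact ((pvInv s.toList).2.2).symm
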